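-- pv_equiv track=rewrite | github.com/MichaelLangbein/logic | ie/substitution.py | dictUnion
-- ===== SOURCE A (Python) =====
-- def tolist(something):
--     try:
--         return list(something)
--     except:
--         return [something]
--
-- def listUnion(list1, list2):
--     if list1 is None:
--         return list2
--     if list2 is None:
--         return list1
--     uList = list1
--     for entry in list2:
--         if entry not in list1:
--             uList.append(entry)
--     return uList
--
-- def dictUnion(dict1, dict2):
--     if dict1 is None:
--         return dict2
--     if dict2 is None:
--         return dict1
--     uDict = {}
--     keys = listUnion(tolist(dict1.keys()), tolist(dict2.keys()))
--     for key in keys: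
--         d1v = d2v = None
--         if key in dict1:
--             d1v = tolist(dict1[key])
--         if key in dict2:
--             d2v = tolist(dict2[key])
--         uDict[key] = listUnion(d1v, d2v)
--     return uDict
-- ===== SOURCE B (Python) =====
-- def tolist(something):
--     try:
--         return list(something)
--     except:
--         return [something]
--
-- def dictUnion(dict1, dict2):
--     if dict1 is None:
--         return dict2
--     if dict2 is None:
--         return dict1
--     result = {key: tolist(value) for key, value in dict1.items()}
--     for key, value in dict2.items():
--         if key in result:
--             merged = result[key]
--             for entry in tolist(value):
--                 if entry not in merged:
--                     merged.append(entry)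
--         else:
--             result[key] = tolist(value)
--     return result
-- ===== Notes on version B (the rewrite author's own statement) =====
-- stated objective: faster
-- what changed: B drops A's precomputed union key list (whose listUnion does a linear membership scan of the growing key list per key) and its per-key double dict lookups: it copies dict1's items into the result in one pass, then folds dict2's items in directly, appending only unseen entries for existing keys.
import Mathlib
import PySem

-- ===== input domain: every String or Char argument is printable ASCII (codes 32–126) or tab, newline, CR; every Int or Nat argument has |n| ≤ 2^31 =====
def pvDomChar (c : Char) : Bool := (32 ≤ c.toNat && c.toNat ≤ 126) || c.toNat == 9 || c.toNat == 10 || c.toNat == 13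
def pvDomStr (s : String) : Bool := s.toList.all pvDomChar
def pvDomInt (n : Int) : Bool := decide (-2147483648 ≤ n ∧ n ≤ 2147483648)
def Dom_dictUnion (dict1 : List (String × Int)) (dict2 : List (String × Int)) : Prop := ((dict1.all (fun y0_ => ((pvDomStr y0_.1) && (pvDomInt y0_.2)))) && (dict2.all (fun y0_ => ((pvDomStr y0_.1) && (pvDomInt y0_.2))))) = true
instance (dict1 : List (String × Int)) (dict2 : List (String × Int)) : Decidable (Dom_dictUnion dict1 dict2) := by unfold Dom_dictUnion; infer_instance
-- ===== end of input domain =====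

-- B drops A's precomputed union-key list: it copies dict1's items and then folds dict2's
-- items in directly (objective: simpler). The Python inputs are dicts, so the None guards
-- of A and B never fire on the modelled domain and are not ported.

-- ===== PORT A =====
-- listUnion(list1, list2) in the non-None case; uList aliases list1 in the Python,
-- so the membership test is against the growing list.
def pyListUnion {α : Type} [BEq α] (list1 list2 : List α) : List α :=
  list2.foldl (fun uList entry => if uList.contains entry then uList else uList ++ [entry]) list1

-- listUnion applied to the possibly-None per-key values d1v/d2v (inside dictUnion at
-- least one of them is non-None; the none/none branch is unreachable there).
def pyListUnionO (l1 l2 : Option (List Int)) : List Int :=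
  match l1, l2 with
  | none, l2 => l2.getD []
  | some a, none => a
  | some a, some b => pyListUnion a b

def dictUnion (dict1 : List (String × Int)) (dict2 : List (String × Int)) : List (String × List Int) :=
  let d1 : PySem.Dict String Int := PySem.Dict.ofList dict1
  let d2 : PySem.Dict String Int := PySem.Dict.ofList dict2
  -- keys = listUnion(tolist(dict1.keys()), tolist(dict2.keys()))
  let keys := pyListUnion d1.keys d2.keys
  let uDict := keys.foldl (fun (uDict : PySem.Dict String (List Int)) key =>
      -- d1v = tolist(dict1[key]) if key in dict1 else None; values are ints so tolist gives [v]
      let d1v : Option (List Int) := (d1.get? key).map (fun v => [v])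
      let d2v : Option (List Int) := (d2.get? key).map (fun v => [v])
      uDict.insert key (pyListUnionO d1v d2v)) PySem.Dict.empty
  uDict.items

-- ===== PORT B =====
def dictUnion_alt (dict1 : List (String × Int)) (dict2 : List (String × Int)) : List (String × List Int) :=
  let d1 : PySem.Dict String Int := PySem.Dict.ofList dict1
  let d2 : PySem.Dict String Int := PySem.Dict.ofList dict2
  -- result = {key: [value] for key, value in dict1.items()}
  let result0 := d1.items.foldl
      (fun (r : PySem.Dict String (List Int)) kv => r.insert kv.1 [kv.2]) PySem.Dict.empty
  -- for key, value in dict2.items(): …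
  let result := d2.items.foldl
      (fun (r : PySem.Dict String (List Int)) kv =>
        if r.contains kv.1 then
          if (r.getD kv.1 []).contains kv.2 then r
          else r.modify kv.1 [] (fun merged => merged ++ [kv.2])  -- result[key].append(value)
        else r.insert kv.1 [kv.2]) result0
  result.items

-- ===== PRECONDITION & SPEC =====
def Spec_dictUnion (dict1 : List (String × Int)) (dict2 : List (String × Int)) (out : List (String × List Int)) : Prop := out = dictUnion_alt dict1 dict2
instance (dict1 : List (String × Int)) (dict2 : List (String × Int)) (out : List (String × List Int)) : Decidable (Spec_dictUnion dict1 dict2 out) := by unfold Spec_dictUnion; infer_instance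

-- ===== CLAIM (what is proved, stated in full; the proofs are below) =====
def Claim_equal_dictUnion : Prop := ∀ (dict1 : List (String × Int)) (dict2 : List (String × Int)), Dom_dictUnion dict1 dict2 → Spec_dictUnion dict1 dict2 (dictUnion dict1 dict2)

-- ===== LEMMAS AND PROOFS =====

-- the merged value both programs associate with a key
def mergeVal (d1 d2 : PySem.Dict String Int) (k : String) : List Int :=
  pyListUnionO ((d1.get? k).map (fun v => [v])) ((d2.get? k).map (fun v => [v]))

-- B's second loop body
def bodyB (r : PySem.Dict String (List Int)) (kv : String × Int) : PySem.Dict String (List Int) :=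
  if r.contains kv.1 then
    if (r.getD kv.1 []).contains kv.2 then r
    else r.modify kv.1 [] (fun merged => merged ++ [kv.2])
  else r.insert kv.1 [kv.2]

lemma pyListUnion_eq_update {α : Type} [BEq α] (l1 l2 : List α) :
    pyListUnion l1 l2 = PySem.Set.update l1 l2 := rfl

lemma dictUnion_eq_map (dict1 dict2 : List (String × Int)) :
    dictUnion dict1 dict2 =
      (pyListUnion (PySem.Dict.ofList dict1).keys (PySem.Dict.ofList dict2).keys).map
        (fun k => (k, mergeVal (PySem.Dict.ofList dict1) (PySem.Dict.ofList dict2) k)) := by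
  have h2 : (pyListUnion (PySem.Dict.ofList dict1).keys
      ((PySem.Dict.ofList dict2 : PySem.Dict String Int)).keys).Nodup := by
    rw [pyListUnion_eq_update]
    exact PySem.Set.nodup_update _ _ (PySem.Dict.nodup_keys_ofList dict1)
  have h := PySem.Dict.items_foldl_insert_fresh (ν := List Int)
      (pyListUnion (PySem.Dict.ofList dict1).keys (PySem.Dict.ofList dict2).keys)
      (fun k => k) (mergeVal (PySem.Dict.ofList dict1) (PySem.Dict.ofList dict2)) PySem.Dict.empty
      (by intro a _; simp [pysem]) (by simpa using h2)
  simpa [dictUnion, mergeVal] using h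

lemma r0_items (dict1 : List (String × Int)) :
    ((PySem.Dict.ofList dict1).items.foldl
      (fun (r : PySem.Dict String (List Int)) kv => r.insert kv.1 [kv.2]) PySem.Dict.empty).items
      = (PySem.Dict.ofList dict1).items.map (fun kv => (kv.1, [kv.2])) := by
  have h := PySem.Dict.items_foldl_insert_fresh (ν := List Int)
      (PySem.Dict.ofList dict1).items (fun kv => kv.1) (fun kv => ([kv.2] : List Int))
      PySem.Dict.empty (by intro a _; simp [pysem])
      (by simpa [PySem.Dict.keys] using PySem.Dict.nodup_keys_ofList dict1)
  simpa using h

lemma r0_get? (dict1 : List (String × Int)) (k : String) :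
    ((PySem.Dict.ofList dict1).items.foldl
      (fun (r : PySem.Dict String (List Int)) kv => r.insert kv.1 [kv.2]) PySem.Dict.empty).get? k
      = ((PySem.Dict.ofList dict1).get? k).map (fun v => [v]) := by
  simp [PySem.Dict.get?, r0_items dict1, List.find?_map, Option.map_map, Function.comp_def]

lemma r0_keys (dict1 : List (String × Int)) :
    ((PySem.Dict.ofList dict1).items.foldl
      (fun (r : PySem.Dict String (List Int)) kv => r.insert kv.1 [kv.2]) PySem.Dict.empty).keys
      = (PySem.Dict.ofList dict1).keys := by
  simp [PySem.Dict.keys, r0_items dict1, List.map_map, Function.comp]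

lemma foldB_keys (l : List (String × Int)) (r : PySem.Dict String (List Int)) :
    (l.foldl bodyB r).keys = PySem.Set.update r.keys (l.map Prod.fst) := by
  induction l generalizing r with
  | nil => simp [PySem.Set.update]
  | cons p t ih =>
    have hstep : (bodyB r p).keys = PySem.Set.add r.keys p.1 := by
      unfold bodyB
      split_ifs with hc hv
      · have : p.1 ∈ r.keys := (PySem.Dict.contains_iff_mem_keys r p.1).mp hc
        simp [PySem.Set.add, PySem.Set.contains, this]
      · have h1 : p.1 ∈ r.keys := (PySem.Dict.contains_iff_mem_keys r p.1).mp hc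
        have hc' : (r.modify p.1 [] (fun merged => merged ++ [p.2])).keys
            = (r.insert p.1 ((r.getD p.1 []) ++ [p.2])).keys :=
          PySem.Dict.keys_modify r p.1 [] (fun merged => merged ++ [p.2])
        rw [hc', PySem.Dict.keys_insert_of_contains _ _ hc]
        simp [PySem.Set.add, PySem.Set.contains, h1]
      · have h1 : p.1 ∉ r.keys := fun hm =>
          hc ((PySem.Dict.contains_iff_mem_keys r p.1).mpr hm)
        rw [PySem.Dict.keys_insert_of_not_contains _ _ (eq_false_of_ne_true hc)]
        simp [PySem.Set.add, PySem.Set.contains, h1]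
    simp only [List.foldl_cons, ih, hstep, List.map_cons]
    rfl

lemma foldB_getD (l : List (String × Int)) (hl : (l.map Prod.fst).Nodup)
    (r : PySem.Dict String (List Int)) (k : String) :
    (l.foldl bodyB r).getD k [] =
      match l.find? (fun p => p.1 == k) with
      | none => r.getD k []
      | some p =>
          if r.contains k then
            (if (r.getD k []).contains p.2 then r.getD k [] else r.getD k [] ++ [p.2])
          else [p.2] := by
  induction l generalizing r with
  | nil => simp
  | cons p t ih =>
    simp only [List.map_cons, List.nodup_cons] at hl
    obtain ⟨hp, hlt⟩ := hl
    by_cases hk : p.1 = k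
    · subst hk
      have hfind : t.find? (fun q => q.1 == p.1) = none := by
        rw [List.find?_eq_none]
        intro q hq
        simp only [beq_iff_eq]
        intro hqe
        exact hp (hqe ▸ List.mem_map_of_mem hq)
      have hnotin : ∀ (r' : PySem.Dict String (List Int)),
          (t.foldl bodyB r').getD p.1 [] = r'.getD p.1 [] := by
        intro r'
        rw [ih hlt r', hfind]
      simp only [List.foldl_cons]
      rw [hnotin (bodyB r p)]
      unfold bodyB
      split_ifs with hc hv
      · have hmem : p.2 ∈ r.getD p.1 [] := by simpa using hv
        simp [List.find?_cons, hc, hv, hmem]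
      · simp only [List.find?_cons, beq_self_eq_true, if_pos rfl, hc, hv]
        simp [PySem.Dict.getD_modify_self, hc, hv]
      · simp [List.find?_cons, hc, PySem.Dict.getD_insert_self]
    · have h1 : (bodyB r p).getD k [] = r.getD k [] := by
        unfold bodyB
        split_ifs with hc hv
        · rfl
        · simp [PySem.Dict.modify, PySem.Dict.getD_insert, Ne.symm hk]
        · simp [PySem.Dict.getD_insert, Ne.symm hk]
      have h2 : (bodyB r p).contains k = r.contains k := by
        unfold bodyB
        split_ifs with hc hv
        · rfl
        · simp only [PySem.Dict.modify, PySem.Dict.contains_insert]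
          simp only [Bool.or_eq_right_iff_imp, beq_iff_eq]
          intro h; exact absurd h.symm hk
        · simp only [PySem.Dict.contains_insert]
          simp only [Bool.or_eq_right_iff_imp, beq_iff_eq]
          intro h; exact absurd h.symm hk
      simp only [List.foldl_cons]
      rw [ih hlt (bodyB r p)]
      have hfc : (p :: t).find? (fun q => q.1 == k) = t.find? (fun q => q.1 == k) := by
        simp [List.find?_cons, hk]
      rw [hfc]
      cases hfind : t.find? (fun q => q.1 == k) with
      | none => simp [hfind, h1]
      | some q => simp [hfind, h1, h2]

-- ===== VERDICT (by name: the statement is the Claim_ definition above) =====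
theorem dictUnion_spec : Claim_equal_dictUnion := by
  intro dict1 dict2 _
  unfold Spec_dictUnion
  rw [dictUnion_eq_map]
  show _ = dictUnion_alt dict1 dict2
  unfold dictUnion_alt
  set d1 : PySem.Dict String Int := PySem.Dict.ofList dict1 with hd1def
  set d2 : PySem.Dict String Int := PySem.Dict.ofList dict2 with hd2def
  set r0 := d1.items.foldl
      (fun (r : PySem.Dict String (List Int)) kv => r.insert kv.1 [kv.2]) PySem.Dict.empty with hr0def
  have hbody : (fun (r : PySem.Dict String (List Int)) kv =>
        if r.contains kv.1 then
          if (r.getD kv.1 []).contains kv.2 then r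
          else r.modify kv.1 [] (fun merged => merged ++ [kv.2])
        else r.insert kv.1 [kv.2]) = bodyB := rfl
  rw [hbody]
  set R := d2.items.foldl bodyB r0 with hRdef
  have hd2keys : d2.items.map Prod.fst = d2.keys := rfl
  have hRkeys : R.keys = PySem.Set.update d1.keys d2.keys := by
    rw [hRdef, foldB_keys, r0_keys, hd2keys]
  have hRnd : R.keys.Nodup := by
    rw [hRkeys]
    exact PySem.Set.nodup_update _ _ (PySem.Dict.nodup_keys_ofList dict1)
  rw [PySem.Dict.items_eq_map_keys R hRnd [], hRkeys, pyListUnion_eq_update]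
  apply List.map_congr_left
  intro k hk
  have hk' : k ∈ d1.keys ∨ k ∈ d2.keys := (PySem.Set.mem_update d1.keys d2.keys k).mp hk
  have hd2nd : (d2.items.map Prod.fst).Nodup := by
    rw [hd2keys]; exact PySem.Dict.nodup_keys_ofList dict2
  have hget : R.getD k [] =
      match d2.items.find? (fun p => p.1 == k) with
      | none => r0.getD k []
      | some p =>
          if r0.contains k then
            (if (r0.getD k []).contains p.2 then r0.getD k [] else r0.getD k [] ++ [p.2])
          else [p.2] := foldB_getD d2.items hd2nd r0 k
  have hr0g : r0.get? k = (d1.get? k).map (fun v => [v]) := r0_get? dict1 k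
  have hr0getD : r0.getD k [] = ((d1.get? k).map (fun v => [v])).getD [] := by
    rw [PySem.Dict.getD_eq_get?_getD, hr0g]
  have hr0c : r0.contains k = (d1.get? k).isSome := by
    rw [PySem.Dict.contains_eq_isSome_get?, hr0g, Option.isSome_map]
  cases hd2g : d2.get? k with
  | none =>
    have hfind : d2.items.find? (fun p => p.1 == k) = none := by
      simpa [PySem.Dict.get?, Option.map_eq_none_iff] using hd2g
    have hk1 : k ∈ d1.keys := by
      rcases hk' with h | h
      · exact h
      · exact absurd h ((PySem.Dict.get?_eq_none_iff_not_mem_keys d2 k).mp hd2g)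
    cases hd1g : d1.get? k with
    | none => exact absurd hk1 ((PySem.Dict.get?_eq_none_iff_not_mem_keys d1 k).mp hd1g)
    | some a =>
      rw [hget, hfind]
      simp [mergeVal, hd1g, hd2g, pyListUnionO, hr0getD]
  | some b =>
    obtain ⟨p, hfp, hpb⟩ : ∃ p, d2.items.find? (fun q => q.1 == k) = some p ∧ p.2 = b := by
      have := hd2g
      simp only [PySem.Dict.get?, Option.map_eq_some_iff] at this
      obtain ⟨p, h1, h2⟩ := this
      exact ⟨p, h1, h2⟩
    rw [hget, hfp]
    cases hd1g : d1.get? k with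
    | none =>
      have : r0.contains k = false := by rw [hr0c, hd1g]; rfl
      simp [this, mergeVal, hd1g, hd2g, pyListUnionO, hpb]
    | some a =>
      have hct : r0.contains k = true := by rw [hr0c, hd1g]; rfl
      have hgd : r0.getD k [] = [a] := by rw [hr0getD, hd1g]; rfl
      simp only [hct, if_true, hgd, hpb]
      simp [mergeVal, hd1g, hd2g, pyListUnionO, pyListUnion]
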